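-- pv_equiv track=rewrite | github.com/RosesofthePhoenix/alma_os | alma/ui/pages/spotify_resonance.py | _proxy_audio_meta
-- ===== SOURCE A (Python) =====
-- from typing import Dict, List, Optional
--
-- def _proxy_audio_meta(title: str, artist: str) -> Dict[str, str]:
--     """Lightweight heuristic from metadata for genre/tempo placeholders."""
--     text = f"{title} {artist}".lower()
--     genre = "unknown"
--     tempo = "mid"
--     if any(k in text for k in ["lofi", "chill", "ambient"]):
--         genre = "chill"
--         tempo = "slow"
--     elif any(k in text for k in ["techno", "edm", "house", "dance"]):
--         genre = "electronic"
--         tempo = "fast"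
--     elif any(k in text for k in ["jazz", "bossa", "samba"]):
--         genre = "jazz"
--         tempo = "mid"
--     elif any(k in text for k in ["classical", "piano", "suite", "concerto"]):
--         genre = "classical"
--         tempo = "slow"
--     elif any(k in text for k in ["hip hop", "rap", "trap"]):
--         genre = "hiphop"
--         tempo = "mid"
--     return {"genre": genre, "tempo": tempo}
-- ===== SOURCE B (Python) =====
-- _KEYWORDS = [
--     ("lofi", 0), ("chill", 0), ("ambient", 0),
--     ("techno", 1), ("edm", 1), ("house", 1), ("dance", 1),
--     ("jazz", 2), ("bossa", 2), ("samba", 2),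
--     ("classical", 3), ("piano", 3), ("suite", 3), ("concerto", 3),
--     ("hip hop", 4), ("rap", 4), ("trap", 4),
-- ]
-- _OUTCOMES = [
--     ("chill", "slow"), ("electronic", "fast"), ("jazz", "mid"),
--     ("classical", "slow"), ("hiphop", "mid"), ("unknown", "mid"),
-- ]
--
-- def _proxy_audio_meta(title: str, artist: str):
--     text = f"{title} {artist}".lower()
--     best = 5
--     for kw, rank in _KEYWORDS:
--         if rank < best and kw in text:
--             best = rank
--     genre, tempo = _OUTCOMES[best]
--     return {"genre": genre, "tempo": tempo}
-- ===== Notes on version B (the rewrite author's own statement) =====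
-- stated objective: alternative
-- what changed: Instead of A's five-branch elif chain of group scans, B does one flat pass over all keywords as a min-reduction (tracking the smallest matched priority rank) and then indexes an outcome table with that minimum; no branch chain and no short-circuit between groups.
import Mathlib
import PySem

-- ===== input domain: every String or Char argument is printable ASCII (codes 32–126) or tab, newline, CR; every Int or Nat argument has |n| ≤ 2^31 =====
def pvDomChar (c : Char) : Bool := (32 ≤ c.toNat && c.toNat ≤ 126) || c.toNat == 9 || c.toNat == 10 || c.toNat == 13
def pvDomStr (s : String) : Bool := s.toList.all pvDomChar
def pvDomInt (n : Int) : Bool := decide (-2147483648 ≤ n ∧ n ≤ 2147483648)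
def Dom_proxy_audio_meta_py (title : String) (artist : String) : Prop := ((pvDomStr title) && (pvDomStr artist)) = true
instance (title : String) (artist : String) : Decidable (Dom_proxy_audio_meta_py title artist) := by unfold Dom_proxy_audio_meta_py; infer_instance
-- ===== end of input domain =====

-- B replaces A's five-branch elif chain by a single flat min-reduction over all keywords (tracking the
-- smallest matched priority rank) followed by an outcome-table lookup; same results, different structure.

-- ===== PORT A =====
-- literal transliteration of A's elif chain
def proxy_audio_meta_py (title : String) (artist : String) : List (String × String) :=
  let text := PySem.Chars.lower (title.toList ++ [' '] ++ artist.toList)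
  let gt : String × String :=
    if ["lofi", "chill", "ambient"].any (fun k => PySem.Chars.isIn k.toList text) then
      ("chill", "slow")
    else if ["techno", "edm", "house", "dance"].any (fun k => PySem.Chars.isIn k.toList text) then
      ("electronic", "fast")
    else if ["jazz", "bossa", "samba"].any (fun k => PySem.Chars.isIn k.toList text) then
      ("jazz", "mid")
    else if ["classical", "piano", "suite", "concerto"].any (fun k => PySem.Chars.isIn k.toList text) then
      ("classical", "slow")
    else if ["hip hop", "rap", "trap"].any (fun k => PySem.Chars.isIn k.toList text) then
      ("hiphop", "mid")
    else ("unknown", "mid")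
  [("genre", gt.1), ("tempo", gt.2)]

-- ===== PORT B =====
-- the flat ranked keyword list of Source B
def pvKeywords : List (String × Nat) :=
  [ ("lofi", 0), ("chill", 0), ("ambient", 0),
    ("techno", 1), ("edm", 1), ("house", 1), ("dance", 1),
    ("jazz", 2), ("bossa", 2), ("samba", 2),
    ("classical", 3), ("piano", 3), ("suite", 3), ("concerto", 3),
    ("hip hop", 4), ("rap", 4), ("trap", 4) ]

def pvOutcomes : List (String × String) :=
  [ ("chill", "slow"), ("electronic", "fast"), ("jazz", "mid"),
    ("classical", "slow"), ("hiphop", "mid"), ("unknown", "mid") ]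

-- loop body of Source B: keep the smaller matched rank
def pvStep (text : List Char) (best : Nat) (e : String × Nat) : Nat :=
  if e.2 < best && PySem.Chars.isIn e.1.toList text then e.2 else best

-- Source B indexes _OUTCOMES[best]; best ≤ 5 always holds, so the plain getD is exact here
def proxy_audio_meta_py_alt (title : String) (artist : String) : List (String × String) :=
  let text := PySem.Chars.lower (title.toList ++ [' '] ++ artist.toList)
  let best := pvKeywords.foldl (pvStep text) 5
  let gt := pvOutcomes.getD best ("unknown", "mid")
  [("genre", gt.1), ("tempo", gt.2)]

-- ===== PRECONDITION & SPEC =====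
def Spec_proxy_audio_meta_py (title : String) (artist : String) (out : List (String × String)) : Prop := out = proxy_audio_meta_py_alt title artist
instance (title : String) (artist : String) (out : List (String × String)) : Decidable (Spec_proxy_audio_meta_py title artist out) := by unfold Spec_proxy_audio_meta_py; infer_instance

-- ===== CLAIM (what is proved, stated in full; the proofs are below) =====
def Claim_equal_proxy_audio_meta_py : Prop := ∀ (title : String) (artist : String), Dom_proxy_audio_meta_py title artist → Spec_proxy_audio_meta_py title artist (proxy_audio_meta_py title artist)

-- ===== LEMMAS AND PROOFS =====

-- folding a same-rank group updates the accumulator to the rank iff some keyword matches and the rank improves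
theorem pvFold_same_rank (text : List Char) (r acc : Nat) (kws : List String) :
    List.foldl (pvStep text) acc (kws.map (fun k => (k, r)))
      = if (kws.any (fun k => PySem.Chars.isIn k.toList text)) ∧ r < acc then r else acc := by
  induction kws generalizing acc with
  | nil => simp
  | cons k ks ih =>
    simp only [List.map_cons, List.foldl_cons, List.any_cons, pvStep]
    by_cases hr : r < acc <;> by_cases hk : PySem.Chars.isIn k.toList text <;>
      simp [hr, hk, ih]

-- ===== VERDICT (by name: the statement is the Claim_ definition above) =====
theorem proxy_audio_meta_py_spec : Claim_equal_proxy_audio_meta_py := by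
  intro title artist _
  unfold Spec_proxy_audio_meta_py proxy_audio_meta_py proxy_audio_meta_py_alt
  have hk : pvKeywords
      = (["lofi", "chill", "ambient"].map (fun k => (k, 0)))
        ++ (["techno", "edm", "house", "dance"].map (fun k => (k, 1)))
        ++ (["jazz", "bossa", "samba"].map (fun k => (k, 2)))
        ++ (["classical", "piano", "suite", "concerto"].map (fun k => (k, 3)))
        ++ (["hip hop", "rap", "trap"].map (fun k => (k, 4))) := by rfl
  set t := PySem.Chars.lower (title.toList ++ [' '] ++ artist.toList) with ht
  simp only [hk, List.foldl_append, pvFold_same_rank]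
  by_cases h0 : ["lofi", "chill", "ambient"].any (fun k => PySem.Chars.isIn k.toList t) = true <;>
  by_cases h1 : ["techno", "edm", "house", "dance"].any (fun k => PySem.Chars.isIn k.toList t) = true <;>
  by_cases h2 : ["jazz", "bossa", "samba"].any (fun k => PySem.Chars.isIn k.toList t) = true <;>
  by_cases h3 : ["classical", "piano", "suite", "concerto"].any (fun k => PySem.Chars.isIn k.toList t) = true <;>
  by_cases h4 : ["hip hop", "rap", "trap"].any (fun k => PySem.Chars.isIn k.toList t) = true <;>
  simp [h0, h1, h2, h3, h4, pvOutcomes]
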